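-- pv_equiv track=rewrite | github.com/jcstlo/aoc-2024 | day_09/part2.py | separate_block_sizes
-- ===== SOURCE A (Python) =====
-- def separate_block_sizes(nums: list[int]) -> list[(int, int, int)]:
--     # returns list[(id, size, start_idx)]
--     blocks = []
--     start_idx = 0
--     id = 0
--     for idx, num in enumerate(nums):
--         if idx % 2 == 0:
--             blocks.append((id, num, start_idx))
--             id += 1
--         start_idx += num
--     return blocks
-- ===== SOURCE B (Python) =====
-- def separate_block_sizes(nums: list[int]) -> list[(int, int, int)]:
--     # returns list[(id, size, start_idx)]
--     # two-at-a-time walk over (file, gap) pairs: no parity test, only file entries touched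
--     blocks = []
--     i = 0
--     ident = 0
--     start = 0
--     n = len(nums)
--     while i < n:
--         size = nums[i]
--         blocks.append((ident, size, start))
--         gap = nums[i + 1] if i + 1 < n else 0
--         start += size + gap
--         ident += 1
--         i += 2
--     return blocks
-- ===== Notes on version B (the rewrite author's own statement) =====
-- stated objective: alternative
-- what changed: Replaces the fused enumerate loop with a parity test on every index by a two-at-a-time walk over (file, gap) pairs that only ever touches file entries and needs no index-parity check.
import Mathlib
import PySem

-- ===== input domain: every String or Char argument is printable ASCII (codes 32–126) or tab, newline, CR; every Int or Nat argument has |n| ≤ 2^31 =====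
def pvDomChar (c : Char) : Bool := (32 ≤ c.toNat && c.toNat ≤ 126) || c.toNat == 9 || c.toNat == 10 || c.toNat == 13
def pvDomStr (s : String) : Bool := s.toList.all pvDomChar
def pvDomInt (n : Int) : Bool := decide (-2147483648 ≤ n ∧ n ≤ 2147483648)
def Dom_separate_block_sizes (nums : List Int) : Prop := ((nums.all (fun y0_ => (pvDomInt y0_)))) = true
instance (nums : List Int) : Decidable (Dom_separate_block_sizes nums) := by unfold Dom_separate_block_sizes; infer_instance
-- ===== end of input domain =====

-- B replaces A's fused enumerate loop with parity test by a two-at-a-time walk over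
-- (file, gap) pairs (alternative decomposition, same cost).

-- ===== PORT A =====
-- A's for-loop over enumerate(nums) as the obvious structural recursion carrying
-- (blocks, start_idx, id) and the running index idx.
def sbsA_go : List Int → Int → List (Int × Int × Int) → Int → Int → List (Int × Int × Int)
  | [], _, blocks, _, _ => blocks
  | num :: rest, idx, blocks, start_idx, id =>
    if idx % 2 == 0 then
      sbsA_go rest (idx + 1) (blocks ++ [(id, num, start_idx)]) (start_idx + num) (id + 1)
    else
      sbsA_go rest (idx + 1) blocks (start_idx + num) id

def separate_block_sizes (nums : List Int) : List (Int × Int × Int) :=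
  sbsA_go nums 0 [] 0 0

-- ===== PORT B =====
-- Source B's while-loop stepping i by 2: consume a file size and the following gap each round.
def sbsB_go : List (Int × Int × Int) → Int → Int → List Int → List (Int × Int × Int)
  | blocks, _, _, [] => blocks
  | blocks, ident, start, [size] => blocks ++ [(ident, size, start)]
  | blocks, ident, start, size :: gap :: rest =>
    sbsB_go (blocks ++ [(ident, size, start)]) (ident + 1) (start + size + gap) rest

def separate_block_sizes_alt (nums : List Int) : List (Int × Int × Int) :=
  sbsB_go [] 0 0 nums

-- ===== PRECONDITION & SPEC =====
def Spec_separate_block_sizes (nums : List Int) (out : List (Int × Int × Int)) : Prop := out = separate_block_sizes_alt nums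
instance (nums : List Int) (out : List (Int × Int × Int)) : Decidable (Spec_separate_block_sizes nums out) := by unfold Spec_separate_block_sizes; infer_instance

-- ===== CLAIM (what is proved, stated in full; the proofs are below) =====
def Claim_equal_separate_block_sizes : Prop := ∀ (nums : List Int), Dom_separate_block_sizes nums → Spec_separate_block_sizes nums (separate_block_sizes nums)

-- ===== LEMMAS AND PROOFS =====
theorem sbsA_eq_sbsB :
    ∀ (blocks : List (Int × Int × Int)) (ident start : Int) (nums : List Int) (idx : Int),
      idx % 2 = 0 →
      sbsA_go nums idx blocks start ident = sbsB_go blocks ident start nums := by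
  intro blocks ident start nums
  induction blocks, ident, start, nums using sbsB_go.induct with
  | case1 _ _ _ => intro idx h; rfl
  | case2 blocks ident start size =>
    intro idx h
    simp only [sbsA_go, sbsB_go]
    have h1 : (idx % 2 == 0) = true := by simp; omega
    simp [h1]
  | case3 blocks ident start size gap rest ih =>
    intro idx h
    simp only [sbsA_go, sbsB_go]
    have h1 : (idx % 2 == 0) = true := by simp; omega
    have h2 : ((idx + 1) % 2 == 0) = false := by simp; omega
    rw [h1]
    simp only [if_true, h2, Bool.false_eq_true, if_false]
    exact ih (idx + 1 + 1) (by omega)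

-- ===== VERDICT (by name: the statement is the Claim_ definition above) =====
theorem separate_block_sizes_spec : Claim_equal_separate_block_sizes := by
  intro nums _
  unfold Spec_separate_block_sizes separate_block_sizes separate_block_sizes_alt
  exact sbsA_eq_sbsB [] 0 0 nums 0 rfl
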